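-- pv_equiv track=rewrite | github.com/maulanakmal/spam_id | spam_id/main.py | fullShiftTable
-- ===== SOURCE A (Python) =====
-- def matchLength(S, idx1, idx2):
--     # Returns the length of the match of the substrings of S beginning at idx1 and idx2.
--     if idx1 == idx2:
--         return len(S) - idx1
--     match_count = 0
--     while idx1 < len(S) and idx2 < len(S) and S[idx1] == S[idx2]:
--         match_count += 1
--         idx1 += 1
--         idx2 += 1
--     return match_count
--
-- def fundamentalPreprocess(S):
--     # Returns Z, the Fundamental Preprocessing of S. Z[i] is the length of the substring
--     # beginning at i which is also a prefix of S. This pre-processing is done in O(n) time,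
--     # where n is the length of S.
--     if len(S) == 0: # Handles case of empty string
--         return []
--     if len(S) == 1: # Handles case of single-character string
--         return [1]
--     z = [0 for x in S]
--     z[0] = len(S)
--     z[1] = matchLength(S, 0, 1)
--     for i in range(2, 1+z[1]): # Optimization from exercise 1-5
--         z[i] = z[1]-i+1
--     # Defines lower and upper limits of z-box
--     l = 0
--     r = 0
--     for i in range(2+z[1], len(S)):
--         if i <= r: # i falls within existing z-box
--             k = i-l
--             b = z[k]
--             a = r-i+1
--             if b < a: # b ends within existing z-box
--                 z[i] = b
--             else: # b ends at or after the end of the z-box, we need to do an explicit match to the right of the z-box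
--                 z[i] = a+matchLength(S, a, r+1)
--                 l = i
--                 r = i+z[i]-1
--         else: # i does not reside within existing z-box
--             z[i] = matchLength(S, 0, i)
--             if z[i] > 0:
--                 l = i
--                 r = i+z[i]-1
--     return z
--
-- def fullShiftTable(S):
--
--     # Generates F for S, an array used in a special case of the good suffix rule in the Boyer-Moore
--     # string search algorithm. F[i] is the length of the longest suffix of S[i:] that is also a
--     # prefix of S. In the cases it is used, the shift magnitude of the pattern P relative to the
--     # text T is len(P) - F[i] for a mismatch occurring at i-1.
--
--     F = [0 for c in S]
--     Z = fundamentalPreprocess(S)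
--     longest = 0
--     for i, zv in enumerate(reversed(Z)):
--         longest = max(zv, longest) if zv == i+1 else longest
--         F[-i-1] = longest
--     return F
-- ===== SOURCE B (Python) =====
-- def fullShiftTable(S):
--     # Simpler: F[i] is the longest border (suffix that is also a prefix) of S with
--     # length <= len(S) - i.  Collect all border lengths once, then fill F with a
--     # descending pointer over the ascending border list.
--     n = len(S)
--     borders = [k for k in range(1, n + 1) if S[:k] == S[n - k:]]
--     F = []
--     j = len(borders) - 1
--     for i in range(n):
--         while j >= 0 and borders[j] > n - i:
--             j -= 1
--         F.append(borders[j] if j >= 0 else 0)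
--     return F
-- ===== Notes on version B (the rewrite author's own statement) =====
-- stated objective: simpler
-- what changed: Replaces the linear-time Z-algorithm (matchLength/fundamentalPreprocess z-box preprocessing plus a reversed-enumerate fill) by a direct-definition version: collect the border lengths of S (prefixes that are also suffixes) in one comprehension, then fill F[i] = largest border <= n-i with a single descending pointer over the ascending border list.
import Mathlib
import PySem

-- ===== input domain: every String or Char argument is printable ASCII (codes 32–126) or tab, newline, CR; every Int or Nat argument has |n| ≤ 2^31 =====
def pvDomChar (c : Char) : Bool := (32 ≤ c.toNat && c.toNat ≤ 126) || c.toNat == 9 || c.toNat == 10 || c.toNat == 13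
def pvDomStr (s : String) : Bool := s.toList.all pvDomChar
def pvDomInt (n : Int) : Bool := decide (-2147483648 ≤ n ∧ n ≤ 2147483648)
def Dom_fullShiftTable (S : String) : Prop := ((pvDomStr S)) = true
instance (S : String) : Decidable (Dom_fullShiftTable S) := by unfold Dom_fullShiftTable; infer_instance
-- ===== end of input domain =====

-- B replaces the linear Z-algorithm with one pass collecting the border lengths of S
-- and a descending-pointer fill of F (objective: simpler; not faster).

-- ===== PORT A =====

-- while loop of matchLength, accumulating match_count
def matchLengthLoop (L : List Char) (idx1 idx2 cnt : Int) : Int :=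
  if h : idx1 < (L.length : Int) ∧ idx2 < (L.length : Int) ∧
      PySem.List.pyGet? L idx1 = PySem.List.pyGet? L idx2 then
    matchLengthLoop L (idx1 + 1) (idx2 + 1) (cnt + 1)
  else cnt
termination_by ((L.length : Int) - idx1).toNat
decreasing_by omega

def matchLength (S : String) (idx1 idx2 : Int) : Int :=
  if idx1 = idx2 then PySem.Str.len S - idx1
  else matchLengthLoop S.toList idx1 idx2 0

-- body of the z-box loop of fundamentalPreprocess; state (z, l, r)
def fpStep (S : String) (st : List Int × Int × Int) (i : Int) : List Int × Int × Int :=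
  let z := st.1
  let l := st.2.1
  let r := st.2.2
  if i ≤ r then
    let k := i - l
    let b := PySem.List.pyGetD z k 0
    let a := r - i + 1
    if b < a then (PySem.List.pySetD z i b, l, r)
    else
      let zi := a + matchLength S a (r + 1)
      (PySem.List.pySetD z i zi, i, i + zi - 1)
  else
    let zi := matchLength S 0 i
    if zi > 0 then (PySem.List.pySetD z i zi, i, i + zi - 1)
    else (PySem.List.pySetD z i zi, l, r)

def fundamentalPreprocess (S : String) : List Int :=
  if PySem.Str.len S = 0 then []
  else if PySem.Str.len S = 1 then [1]
  else
    let z0 := S.toList.map (fun _ => (0 : Int))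
    let za := PySem.List.pySetD z0 0 (PySem.Str.len S)
    let zb := PySem.List.pySetD za 1 (matchLength S 0 1)
    let zc := (PySem.List.pyRange 2 (1 + PySem.List.pyGetD zb 1 0) 1).foldl
        (fun z i => PySem.List.pySetD z i (PySem.List.pyGetD z 1 0 - i + 1)) zb
    let st := (PySem.List.pyRange (2 + PySem.List.pyGetD zc 1 0) (PySem.Str.len S) 1).foldl
        (fpStep S) (zc, 0, 0)
    st.1

-- body of the fullShiftTable loop; state (longest, F); p = (i, zv) from enumerate(reversed(Z))
def fstStep (st : Int × List Int) (p : Int × Int) : Int × List Int :=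
  let longest := if p.2 = p.1 + 1 then max p.2 st.1 else st.1
  (longest, PySem.List.pySetD st.2 (-p.1 - 1) longest)

def fullShiftTable (S : String) : List Int :=
  let F := S.toList.map (fun _ => (0 : Int))
  let Z := fundamentalPreprocess S
  ((PySem.List.enumerate Z.reverse 0).foldl fstStep (0, F)).2

-- ===== PORT B =====

-- borders = [k for k in range(1, n + 1) if S[:k] == S[n - k:]]
def bmBorders (S : String) : List Int :=
  (PySem.List.pyRange 1 (PySem.Str.len S + 1) 1).filter
    (fun k => PySem.List.slice S.toList none (some k)
        == PySem.List.slice S.toList (some (PySem.Str.len S - k)) none)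

-- while j >= 0 and borders[j] > bound: j -= 1
def bmScan (borders : List Int) (j bound : Int) : Int :=
  if h : 0 ≤ j ∧ bound < PySem.List.pyGetD borders j 0 then bmScan borders (j - 1) bound
  else j
termination_by (j + 1).toNat
decreasing_by omega

def fullShiftTable_alt (S : String) : List Int :=
  let n := PySem.Str.len S
  let borders := bmBorders S
  (((PySem.List.pyRange 0 n 1).foldl
    (fun (st : List Int × Int) i =>
      let j := bmScan borders st.2 (n - i)
      (st.1 ++ [if 0 ≤ j then PySem.List.pyGetD borders j 0 else 0], j))
    ([], PySem.List.len borders - 1))).1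

-- ===== PRECONDITION & SPEC =====
def Spec_fullShiftTable (S : String) (out : List Int) : Prop := out = fullShiftTable_alt S
instance (S : String) (out : List Int) : Decidable (Spec_fullShiftTable S out) := by unfold Spec_fullShiftTable; infer_instance

-- ===== CLAIM (what is proved, stated in full; the proofs are below) =====
def Claim_equal_fullShiftTable : Prop := ∀ (S : String), Dom_fullShiftTable S → Spec_fullShiftTable S (fullShiftTable S)

-- ===== LEMMAS AND PROOFS =====

-- ===== Section 1: lcp =====
def lcp : List Char → List Char → Nat
  | a :: x, b :: y => if a = b then lcp x y + 1 else 0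
  | _, _ => 0

theorem lcp_le_right (x y : List Char) : lcp x y ≤ y.length := by
  induction x generalizing y with
  | nil => cases y <;> simp [lcp]
  | cons a x ih =>
    cases y with
    | nil => simp [lcp]
    | cons b y =>
      by_cases h : a = b <;> simp [lcp, h]
      exact ih y

theorem lcp_self (x : List Char) : lcp x x = x.length := by
  induction x with
  | nil => simp [lcp]
  | cons a x ih => simp [lcp, ih]

theorem lcp_agree (x y : List Char) (j : Nat) (hj : j < lcp x y) :
    x[j]? = y[j]? ∧ (x[j]?).isSome := by
  induction x generalizing y j with
  | nil => cases y <;> simp [lcp] at hj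
  | cons a x ih =>
    cases y with
    | nil => simp [lcp] at hj
    | cons b y =>
      by_cases h : a = b
      · subst h
        cases j with
        | zero => simp
        | succ j =>
          simp only [lcp, if_true] at hj
          have := ih y j (by omega)
          simpa using this
      · simp [lcp, h] at hj

theorem lcp_stop (x y : List Char) :
    ¬ (x[lcp x y]? = y[lcp x y]? ∧ (x[lcp x y]?).isSome) := by
  induction x generalizing y with
  | nil => cases y <;> simp [lcp]
  | cons a x ih =>
    cases y with
    | nil => simp [lcp]
    | cons b y =>
      by_cases h : a = b
      · subst a
        simpa [lcp] using ih y
      · simp [lcp, h]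

theorem lcp_eq_of (x y : List Char) (k : Nat)
    (h1 : ∀ j, j < k → x[j]? = y[j]? ∧ (x[j]?).isSome)
    (h2 : ¬ (x[k]? = y[k]? ∧ (x[k]?).isSome)) : lcp x y = k := by
  rcases Nat.lt_trichotomy (lcp x y) k with h | h | h
  · exact absurd (h1 _ h) (lcp_stop x y)
  · exact h
  · exact absurd (lcp_agree x y k h) h2

-- ===== Section 2: Zv =====
def Zv (L : List Char) (i : Nat) : Nat := lcp L (L.drop i)

theorem zv_agree (L : List Char) (i j : Nat) (hj : j < Zv L i) :
    L[j]? = L[i + j]? ∧ (L[j]?).isSome := by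
  have := lcp_agree L (L.drop i) j hj
  rwa [List.getElem?_drop] at this

theorem zv_stop (L : List Char) (i : Nat) :
    ¬ (L[Zv L i]? = L[i + Zv L i]? ∧ (L[Zv L i]?).isSome) := by
  have := lcp_stop L (L.drop i)
  rwa [List.getElem?_drop] at this

theorem zv_eq_of (L : List Char) (i k : Nat)
    (h1 : ∀ j, j < k → L[j]? = L[i + j]? ∧ (L[j]?).isSome)
    (h2 : ¬ (L[k]? = L[i + k]? ∧ (L[k]?).isSome)) : Zv L i = k := by
  apply lcp_eq_of
  · intro j hj
    have := h1 j hj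
    rwa [List.getElem?_drop]
  · rwa [List.getElem?_drop]

theorem zv_le (L : List Char) (i : Nat) : Zv L i ≤ L.length - i := by
  have := lcp_le_right L (L.drop i)
  simpa using this

theorem zv_zero (L : List Char) : Zv L 0 = L.length := by
  simp [Zv, lcp_self]

-- ===== Section 3: matchLength =====
theorem matchLengthLoop_eq (L : List Char) (i1 i2 c : Int) (h1 : 0 ≤ i1) (h2 : 0 ≤ i2) :
    matchLengthLoop L i1 i2 c = c + (lcp (L.drop i1.toNat) (L.drop i2.toNat) : Int) := by
  rw [matchLengthLoop]
  split
  · rename_i h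
    obtain ⟨ha, hb, hc⟩ := h
    have ha' : i1.toNat < L.length := by omega
    have hb' : i2.toNat < L.length := by omega
    rw [matchLengthLoop_eq L (i1+1) (i2+1) (c+1) (by omega) (by omega)]
    rw [PySem.List.pyGet?_of_nonneg L h1, PySem.List.pyGet?_of_nonneg L h2] at hc
    rw [List.drop_eq_getElem_cons ha', List.drop_eq_getElem_cons hb']
    have hg : L[i1.toNat] = L[i2.toNat] := by
      have := hc
      rw [List.getElem?_eq_getElem ha', List.getElem?_eq_getElem hb'] at this
      exact Option.some.inj this
    simp only [lcp, hg, if_true]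
    have e1 : (i1 + 1).toNat = i1.toNat + 1 := by omega
    have e2 : (i2 + 1).toNat = i2.toNat + 1 := by omega
    rw [e1, e2]
    push_cast
    ring
  · rename_i h
    -- loop exits: lcp of the two suffixes is 0
    have : lcp (L.drop i1.toNat) (L.drop i2.toNat) = 0 := by
      apply lcp_eq_of
      · intro j hj; omega
      · intro hcon
        obtain ⟨he, hs⟩ := hcon
        rw [List.getElem?_drop, List.getElem?_drop] at he
        rw [List.getElem?_drop] at hs
        have hi1 : i1.toNat + 0 < L.length := by
          by_contra hq
          rw [List.getElem?_eq_none (by omega)] at hs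
          simp at hs
        have hi2 : i2.toNat + 0 < L.length := by
          by_contra hq
          rw [show L[i2.toNat + 0]? = none from List.getElem?_eq_none (by omega)] at he
          rw [he] at hs; simp at hs
        apply h
        refine ⟨by omega, by omega, ?_⟩
        rw [PySem.List.pyGet?_of_nonneg L h1, PySem.List.pyGet?_of_nonneg L h2]
        simpa using he
    rw [this]
    simp
termination_by ((L.length : Int) - i1).toNat
decreasing_by omega

theorem matchLength_eq (S : String) (i1 i2 : Int) (hne : i1 ≠ i2) (h1 : 0 ≤ i1) (h2 : 0 ≤ i2) :
    matchLength S i1 i2 = (lcp (S.toList.drop i1.toNat) (S.toList.drop i2.toNat) : Int) := by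
  rw [matchLength, if_neg hne, matchLengthLoop_eq _ _ _ _ h1 h2]
  simp

theorem matchLength_zv (S : String) (i : Int) (hne : i ≠ 0) (h1 : 0 ≤ i) :
    matchLength S 0 i = (Zv S.toList i.toNat : Int) := by
  rw [matchLength_eq S 0 i (by omega) le_rfl h1]
  simp [Zv]

-- ===== Section 4: z-box core lemmas =====
-- helper: index in range iff getElem? isSome
theorem isSome_iff (L : List Char) (j : Nat) : (L[j]?).isSome ↔ j < L.length := by
  constructor
  · intro h
    by_contra hq
    rw [List.getElem?_eq_none (by omega)] at h
    simp at h
  · intro h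
    rw [List.getElem?_eq_getElem h]
    rfl

theorem core_copy (L : List Char) (l k : Nat) (hk : 0 < k)
    (hkz : k < Zv L l) (hb : Zv L k < Zv L l - k) : Zv L (l + k) = Zv L k := by
  set b := Zv L k with hbdef
  apply zv_eq_of
  · intro j hj
    have h1 := zv_agree L k j hj
    have h2 := zv_agree L l (k + j) (by omega)
    refine ⟨?_, h1.2⟩
    rw [h1.1, h2.1, show l + (k + j) = l + k + j by omega]
  · intro hcon
    have h2 := zv_agree L l (k + b) (by omega)
    apply zv_stop L k
    constructor
    · rw [hcon.1]
      have := h2.1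
      rw [show l + (k + b) = l + k + b by ring] at this
      exact this.symm
    · exact hcon.2

theorem core_ext (L : List Char) (l k : Nat) (hk : 0 < k)
    (hkz : k < Zv L l) (hb : Zv L l - k ≤ Zv L k) :
    Zv L (l + k) = (Zv L l - k) + lcp (L.drop (Zv L l - k)) (L.drop (l + Zv L l)) := by
  set a := Zv L l - k with hadef
  set m2 := lcp (L.drop a) (L.drop (l + Zv L l)) with hm2def
  have hm2_agree : ∀ t, t < m2 → L[a + t]? = L[l + Zv L l + t]? ∧ (L[a + t]?).isSome := by
    intro t ht
    have := lcp_agree (L.drop a) (L.drop (l + Zv L l)) t ht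
    rwa [List.getElem?_drop, List.getElem?_drop] at this
  have hm2_stop : ¬ (L[a + m2]? = L[l + Zv L l + m2]? ∧ (L[a + m2]?).isSome) := by
    have := lcp_stop (L.drop a) (L.drop (l + Zv L l))
    rwa [List.getElem?_drop, List.getElem?_drop] at this
  apply zv_eq_of
  · intro j hj
    by_cases hja : j < a
    · -- within the guaranteed part, copy from Zv k then Zv l
      have h1 := zv_agree L k j (by omega)
      have h2 := zv_agree L l (k + j) (by omega)
      refine ⟨?_, h1.2⟩
      rw [h1.1, h2.1, show l + (k + j) = l + k + j by omega]
    · -- beyond: use the explicit match m2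
      have ht := hm2_agree (j - a) (by omega)
      rw [show a + (j - a) = j by omega] at ht
      rw [show l + Zv L l + (j - a) = l + k + j by omega] at ht
      exact ht
  · intro hcon
    apply hm2_stop
    rw [show a + m2 = a + m2 by rfl]
    constructor
    · have := hcon.1
      rw [show l + k + (a + m2) = l + Zv L l + m2 by omega] at this
      exact this
    · exact hcon.2

-- ===== Section 5: phase-1 facts =====
theorem m1_flat (L : List Char) (j : Nat) (hj : j ≤ Zv L 1) : L[j]? = L[0]? := by
  induction j with
  | zero => rfl
  | succ j ih =>
    have h := zv_agree L 1 j (by omega)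
    rw [show j + 1 = 1 + j by omega, ← h.1, ih (by omega)]

theorem zv_phase1 (L : List Char) (i : Nat) (h2 : 2 ≤ i) (hi : i ≤ Zv L 1) :
    Zv L i = Zv L 1 - i + 1 := by
  set m1 := Zv L 1 with hm
  have hm1n : m1 ≤ L.length - 1 := zv_le L 1
  have hsome : ∀ p, p ≤ m1 → (L[p]?).isSome := by
    intro p hp
    rw [isSome_iff]
    omega
  apply zv_eq_of
  · intro j hj
    constructor
    · rw [m1_flat L j (by omega), m1_flat L (i + j) (by omega)]
    · exact hsome j (by omega)
  · intro hcon
    apply zv_stop L 1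
    have e1 : L[m1 - i + 1]? = L[m1]? := by
      rw [m1_flat L (m1 - i + 1) (by omega), m1_flat L m1 (by omega)]
    have e2 : i + (m1 - i + 1) = 1 + m1 := by omega
    rw [e2] at hcon
    refine ⟨?_, hsome m1 le_rfl⟩
    rw [← e1, hcon.1]

theorem zv_m1succ (L : List Char) (h2 : 2 ≤ L.length) : Zv L (Zv L 1 + 1) = 0 := by
  set m1 := Zv L 1 with hm
  have hm1n : m1 ≤ L.length - 1 := zv_le L 1
  apply zv_eq_of
  · intro j hj; omega
  · intro hcon
    apply zv_stop L 1
    refine ⟨?_, ?_⟩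
    · rw [show L[m1]? = L[0]? from m1_flat L m1 le_rfl]
      rw [show (1 : Nat) + m1 = (m1 + 1) + 0 by omega]
      exact hcon.1
    · rw [isSome_iff]; omega

-- ===== Section 6: fundamentalPreprocess computes Zv =====
def ZInv (L : List Char) (i : Int) (st : List Int × Int × Int) : Prop :=
  st.1.length = L.length ∧
  (∀ j : Nat, j < L.length → (j : Int) < i → st.1[j]? = some ((Zv L j : Nat) : Int)) ∧
  (0 ≤ st.2.1 ∧
   ((st.2.1 = 0 ∧ st.2.2 = 0) ∨
    (1 ≤ st.2.1 ∧ st.2.1 < i ∧ st.2.1 < (L.length : Int) ∧ 1 ≤ Zv L st.2.1.toNat ∧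
     st.2.2 = st.2.1 + (Zv L st.2.1.toNat : Int) - 1)))

theorem zinv_mk (L : List Char) (i : Int) (z : List Int) (l r : Int)
    (h1 : z.length = L.length)
    (h2 : ∀ j : Nat, j < L.length → (j : Int) < i → z[j]? = some ((Zv L j : Nat) : Int))
    (h3 : 0 ≤ l)
    (h4 : (l = 0 ∧ r = 0) ∨
      (1 ≤ l ∧ l < i ∧ l < (L.length : Int) ∧ 1 ≤ Zv L l.toNat ∧
       r = l + (Zv L l.toNat : Int) - 1)) : ZInv L i (z, l, r) :=
  ⟨h1, h2, h3, h4⟩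

theorem set_keep (z : List Int) (iN : Nat) (v : Int) (L : List Char) (i : Int)
    (hlen : z.length = L.length) (hiN : iN = i.toNat) (hin : iN < L.length)
    (hv : v = (Zv L iN : Int))
    (hz : ∀ j : Nat, j < L.length → (j : Int) < i → z[j]? = some ((Zv L j : Nat) : Int)) :
    ∀ j : Nat, j < L.length → (j : Int) < i + 1 → (z.set iN v)[j]? = some ((Zv L j : Nat) : Int) := by
  intro j hjn hji
  rw [List.getElem?_set]
  by_cases hji' : iN = j
  · subst hji'
    rw [if_pos rfl, if_pos (by omega)]
    rw [hv]
  · rw [if_neg hji']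
    exact hz j hjn (by omega)

theorem fpStep_inv (S : String) (i : Int) (st : List Int × Int × Int)
    (h2 : 2 ≤ i) (hlt : i < (S.toList.length : Int)) (hinv : ZInv S.toList i st) :
    ZInv S.toList (i + 1) (fpStep S st i) := by
  obtain ⟨z, l, r⟩ := st
  set L := S.toList with hL
  set n := L.length with hn
  obtain ⟨hlen, hz, hl0, hlr⟩ := hinv
  simp only at hlen hz hl0 hlr
  have hiN : i.toNat < n := by omega
  have hsetlen : (PySem.List.pySetD z i ((Zv L i.toNat : Nat) : Int)).length = n := by
    rw [PySem.List.pySetD_of_nonneg z _ (by omega)]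
    simpa using hlen
  rw [fpStep]
  by_cases hir : i ≤ r
  · -- inside the z-box
    rcases hlr with ⟨hl, hr⟩ | ⟨hl1, hli, hln, hzl1, hr⟩
    · omega
    set lN := l.toNat with hlN
    set zl := Zv L lN with hzl
    have hrval : r = l + (zl : Int) - 1 := hr
    set kN := (i - l).toNat with hkN
    have hkPos : 0 < kN := by omega
    have hkzl : kN < zl := by omega
    have hkn : kN < n := by
      have := zv_le L lN
      omega
    have hbval : PySem.List.pyGetD z (i - l) 0 = ((Zv L kN : Nat) : Int) := by
      have h1 := hz kN (by omega) (by omega)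
      rw [PySem.List.pyGetD, PySem.List.pyGet?_of_nonneg z (by omega),
        show (i - l).toNat = kN from hkN.symm, h1]
      rfl
    have hilk : i.toNat = lN + kN := by omega
    rw [if_pos hir]
    simp only [hbval]
    by_cases hba : ((Zv L kN : Nat) : Int) < r - i + 1
    · -- copy case
      have hcc : Zv L i.toNat = Zv L kN := by
        rw [hilk]
        apply core_copy L lN kN hkPos hkzl
        omega
      rw [if_pos hba]
      apply zinv_mk
      · rw [PySem.List.pySetD_of_nonneg z _ (by omega)]
        simpa using hlen
      · simp only [PySem.List.pySetD_of_nonneg z _ (show (0:Int) ≤ i by omega)]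
        exact set_keep z i.toNat _ L i hlen rfl (by omega) (by rw [hcc]) hz
      · omega
      · right
        exact ⟨hl1, by omega, hln, hzl1, hr⟩
    · -- extension case
      have hml : matchLength S (r - i + 1) (r + 1) =
          (lcp (L.drop (zl - kN)) (L.drop (lN + zl)) : Int) := by
        have e1 : (r - i + 1).toNat = zl - kN := by omega
        have e2 : (r + 1).toNat = lN + zl := by omega
        rw [matchLength_eq S _ _ (by omega) (by omega) (by omega), e1, e2]
      have hce : Zv L i.toNat = (zl - kN) + lcp (L.drop (zl - kN)) (L.drop (lN + zl)) := by
        rw [hilk]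
        apply core_ext L lN kN hkPos hkzl
        omega
      have hzi : r - i + 1 + matchLength S (r - i + 1) (r + 1) = ((Zv L i.toNat : Nat) : Int) := by
        rw [hml, hce]
        push_cast
        omega
      have hzipos : 1 ≤ Zv L i.toNat := by
        have hnn : (0:Int) ≤ (lcp (L.drop (zl - kN)) (L.drop (lN + zl)) : Int) := by positivity
        omega
      rw [if_neg hba]
      apply zinv_mk
      · rw [PySem.List.pySetD_of_nonneg z _ (by omega)]
        simpa using hlen
      · simp only [PySem.List.pySetD_of_nonneg z _ (show (0:Int) ≤ i by omega)]
        exact set_keep z i.toNat _ L i hlen rfl (by omega) hzi hz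
      · omega
      · right
        refine ⟨by omega, by omega, by omega, hzipos, ?_⟩
        rw [hzi]
  · -- outside the z-box
    have hml : matchLength S 0 i = ((Zv L i.toNat : Nat) : Int) := by
      rw [matchLength_zv S i (by omega) (by omega)]
    rw [if_neg hir]
    simp only [hml]
    by_cases hpos : ((Zv L i.toNat : Nat) : Int) > 0
    · rw [if_pos hpos]
      apply zinv_mk
      · exact hsetlen
      · simp only [PySem.List.pySetD_of_nonneg z _ (show (0:Int) ≤ i by omega)]
        exact set_keep z i.toNat _ L i hlen rfl (by omega) rfl hz
      · omega
      · right
        exact ⟨by omega, by omega, by omega, by omega, by rfl⟩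
    · rw [if_neg hpos]
      apply zinv_mk
      · exact hsetlen
      · simp only [PySem.List.pySetD_of_nonneg z _ (show (0:Int) ≤ i by omega)]
        exact set_keep z i.toNat _ L i hlen rfl (by omega) rfl hz
      · exact hl0
      · rcases hlr with ⟨ha, hb⟩ | ⟨ha, hb, hc, hd, he⟩
        · left; exact ⟨ha, hb⟩
        · right; exact ⟨ha, by omega, hc, hd, he⟩

theorem fp_fold (S : String) (i : Int) (h2 : 2 ≤ i) (hib : i ≤ (S.toList.length : Int))
    (st : List Int × Int × Int) (hinv : ZInv S.toList i st) :
    ZInv S.toList (S.toList.length : Int)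
      ((PySem.List.pyRange i (S.toList.length : Int) 1).foldl (fpStep S) st) := by
  rcases eq_or_lt_of_le hib with he | hlt
  · rw [← he, PySem.List.pyRange_one_eq_nil le_rfl]
    simpa [← he] using hinv
  · rw [PySem.List.pyRange_one_cons hlt]
    rw [List.foldl_cons]
    exact fp_fold S (i + 1) (by omega) (by omega) _ (fpStep_inv S i st h2 hlt hinv)
termination_by ((S.toList.length : Int) - i).toNat
decreasing_by omega

-- phase-1 fold (the exercise 1-5 optimization loop)
theorem p1_fold (m1c : Int) (b : Int) (z : List Int) (hz1 : z[1]? = some m1c) :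
    ((PySem.List.pyRange 2 b 1).foldl
        (fun z i => PySem.List.pySetD z i (PySem.List.pyGetD z 1 0 - i + 1)) z).length = z.length ∧
    ∀ j : Nat, ((PySem.List.pyRange 2 b 1).foldl
        (fun z i => PySem.List.pySetD z i (PySem.List.pyGetD z 1 0 - i + 1)) z)[j]? =
      if 2 ≤ (j : Int) ∧ (j : Int) < b ∧ j < z.length then some (m1c - j + 1) else z[j]? := by
  rcases le_or_gt b 2 with hb | hb
  · rw [PySem.List.pyRange_one_eq_nil hb]
    refine ⟨rfl, ?_⟩
    intro j
    rw [if_neg (by omega)]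
    rfl
  · have hb' : (2:Int) ≤ b - 1 := by omega
    rw [show b = (b - 1) + 1 by omega, PySem.List.pyRange_one_succ_right (by omega),
      List.foldl_append]
    obtain ⟨ih1, ih2⟩ := p1_fold m1c (b - 1) z hz1
    set w := (PySem.List.pyRange 2 (b-1) 1).foldl
        (fun z i => PySem.List.pySetD z i (PySem.List.pyGetD z 1 0 - i + 1)) z with hw
    have hlen2 : 2 ≤ z.length := by
      by_contra hq
      rw [List.getElem?_eq_none (by omega)] at hz1
      simp at hz1
    have hw1 : w[1]? = some m1c := by
      rw [ih2 1, if_neg (by omega)]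
      exact hz1
    have hwg : PySem.List.pyGetD w 1 0 = m1c := by
      rw [PySem.List.pyGetD, PySem.List.pyGet?_of_nonneg w (by omega)]
      norm_num [hw1]
    simp only [List.foldl_cons, List.foldl_nil, hwg]
    rw [PySem.List.pySetD_of_nonneg w _ (by omega)]
    constructor
    · simp [ih1]
    · intro j
      rw [List.getElem?_set]
      by_cases hj : (b - 1).toNat = j
      · have hjb : (j : Int) = b - 1 := by omega
        rw [if_pos hj, hj]
        by_cases hjl : j < w.length
        · rw [if_pos hjl, if_pos (by omega)]
          congr 1
          omega
        · rw [if_neg hjl, if_neg (by omega)]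
          rw [List.getElem?_eq_none (by omega)]
      · rw [if_neg hj, ih2 j]
        by_cases hc : 2 ≤ (j : Int) ∧ (j : Int) < b - 1 ∧ j < z.length
        · rw [if_pos hc, if_pos (by omega)]
        · rw [if_neg hc, if_neg (by omega)]
termination_by (b - 1).toNat
decreasing_by omega

-- characterization of the z array right before phase 1
theorem zb_getElem (L : List Char) (m1c : Int) (j : Nat) (hj : j < L.length) (h2 : 2 ≤ L.length) :
    (((L.map (fun _ => (0:Int))).set 0 (L.length : Int)).set 1 m1c)[j]? =
      if j = 0 then some (L.length : Int) else if j = 1 then some m1c else some 0 := by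
  rw [List.getElem?_set, List.getElem?_set]
  rcases j with _ | _ | j
  · simp
    exact List.ne_nil_of_length_pos (by omega)
  · simp
    omega
  · rw [if_neg (by omega), if_neg (by omega), if_neg (by omega), if_neg (by omega)]
    rw [List.getElem?_eq_getElem (by simpa using hj)]
    simp

theorem list_eq_map_range (z : List Int) (n : Nat) (f : Nat → Int) (hlen : z.length = n)
    (h : ∀ j : Nat, j < n → z[j]? = some (f j)) :
    z = (List.range n).map (fun j => f j) := by
  apply List.ext_getElem?
  intro j
  by_cases hj : j < n
  · rw [h j hj, List.getElem?_eq_getElem (by simpa using hj)]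
    simp [List.getElem_range]
  · rw [List.getElem?_eq_none (by omega), List.getElem?_eq_none (by simpa using hj)]

theorem fp_eq (S : String) :
    fundamentalPreprocess S = (List.range S.toList.length).map (fun j => ((Zv S.toList j : Nat) : Int)) := by
  set L := S.toList with hL
  set n := L.length with hn
  have hlen : PySem.Str.len S = (n : Int) := by
    simp [PySem.Str.len, hL, hn]
  rcases Nat.lt_or_ge n 2 with hn2 | hn2
  · -- n = 0 or n = 1
    interval_cases n
    · rw [fundamentalPreprocess, if_pos (by rw [hlen]; rfl)]
      simp
    · rw [fundamentalPreprocess, if_neg (by rw [hlen]; norm_num), if_pos (by rw [hlen]; rfl)]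
      have : Zv L 0 = 1 := by
        rw [zv_zero, ← hn]
      simp [this]
  · -- main case
    rw [fundamentalPreprocess, if_neg (by rw [hlen]; omega), if_neg (by rw [hlen]; omega)]
    simp only [hlen]
    set m1 := Zv L 1 with hm1
    have hm1le : m1 ≤ n - 1 := zv_le L 1
    have hmleq : matchLength S 0 1 = ((m1 : Nat) : Int) := by
      rw [matchLength_eq S 0 1 (by omega) le_rfl (by omega)]
      simp [hm1, Zv, hL]
    simp only [hmleq]
    set zb := ((L.map (fun _ => (0:Int))).set 0 ((n : Nat) : Int)).set 1 ((m1 : Nat) : Int) with hzb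
    have hzblen : zb.length = n := by simp [hzb, hn]
    have hzbj : ∀ j : Nat, j < n → zb[j]? =
        if j = 0 then some ((n : Nat) : Int) else if j = 1 then some ((m1 : Nat) : Int) else some 0 := by
      intro j hj
      exact zb_getElem L _ j hj hn2
    have hzb1 : zb[1]? = some ((m1 : Nat) : Int) := by rw [hzbj 1 (by omega)]; rfl
    have hsetzb : PySem.List.pySetD (PySem.List.pySetD (L.map fun _ => (0:Int)) 0 ((n : Nat) : Int)) 1 ((m1:Nat):Int) = zb := by
      rw [PySem.List.pySetD_of_nonneg _ _ (by omega), PySem.List.pySetD_of_nonneg _ _ (by omega)]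
      rfl
    rw [hsetzb]
    have hzbg1 : PySem.List.pyGetD zb 1 0 = ((m1 : Nat) : Int) := by
      rw [PySem.List.pyGetD, PySem.List.pyGet?_of_nonneg zb (by omega)]
      norm_num [hzb1]
    rw [hzbg1]
    obtain ⟨hp1len, hp1⟩ := p1_fold ((m1 : Nat) : Int) (1 + ((m1:Nat):Int)) zb hzb1
    set zc := (PySem.List.pyRange 2 (1 + ((m1:Nat):Int)) 1).foldl
        (fun z i => PySem.List.pySetD z i (PySem.List.pyGetD z 1 0 - i + 1)) zb with hzc
    have hzclen : zc.length = n := by rw [hp1len, hzblen]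
    have hzcj : ∀ j : Nat, j < n → (j : Int) < 2 + ((m1:Nat):Int) → zc[j]? = some ((Zv L j : Nat) : Int) := by
      intro j hjn hji
      rw [hp1 j]
      by_cases hc : 2 ≤ (j : Int) ∧ (j : Int) < 1 + ((m1:Nat):Int) ∧ j < zb.length
      · rw [if_pos hc]
        have hj2 : 2 ≤ j := by omega
        have hjm : j ≤ m1 := by omega
        rw [zv_phase1 L j hj2 hjm]
        congr 1
        push_cast
        omega
      · rw [if_neg hc, hzbj j hjn]
        rcases Nat.lt_or_ge j 2 with hj2 | hj2
        · interval_cases j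
          · rw [if_pos rfl, zv_zero L, ← hn]
          · rw [if_neg (by omega), if_pos rfl]
        · -- j = m1 + 1
          have hjeq : j = m1 + 1 := by omega
          rw [if_neg (by omega), if_neg (by omega), hjeq,
            show Zv L (m1 + 1) = 0 from zv_m1succ L hn2]
          rfl
    have hzc1 : zc[1]? = some ((m1 : Nat) : Int) := by
      rw [hzcj 1 (by omega) (by omega), hm1]
    have hzcg1 : PySem.List.pyGetD zc 1 0 = ((m1 : Nat) : Int) := by
      rw [PySem.List.pyGetD, PySem.List.pyGet?_of_nonneg zc (by omega)]
      norm_num [hzc1]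
    rw [hzcg1]
    have hinv0 : ZInv L (2 + ((m1:Nat):Int)) (zc, 0, 0) :=
      zinv_mk L _ zc 0 0 hzclen hzcj le_rfl (Or.inl ⟨rfl, rfl⟩)
    rcases le_or_gt (2 + ((m1:Nat):Int)) (n : Int) with hcase | hcase
    · have hfin := fp_fold S (2 + ((m1:Nat):Int)) (by omega) (by exact_mod_cast hcase) (zc, 0, 0) hinv0
      obtain ⟨hflen, hfj, -⟩ := hfin
      apply list_eq_map_range _ n _ (by exact_mod_cast hflen)
      intro j hj
      exact hfj j hj (by have hnL : S.toList.length = n := rfl; omega)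
    · rw [PySem.List.pyRange_one_eq_nil (by exact_mod_cast (by omega : ((n:Nat):Int) ≤ 2 + ((m1:Nat):Int)))]
      simp only [List.foldl_nil]
      apply list_eq_map_range _ n _ hzclen
      intro j hj
      exact hzcj j hj (by omega)

-- ===== Section 7: the A-side F fold =====
def maxB (L : List Char) : Nat → Nat
  | 0 => 0
  | t + 1 => if Zv L (L.length - (t + 1)) = t + 1 then t + 1 else maxB L t

theorem maxB_le (L : List Char) (t : Nat) : maxB L t ≤ t := by
  induction t with
  | zero => simp [maxB]
  | succ t ih =>
    rw [maxB]
    split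
    · omega
    · omega

theorem maxB_isB (L : List Char) (t : Nat) :
    maxB L t = 0 ∨ (Zv L (L.length - maxB L t) = maxB L t ∧ 1 ≤ maxB L t ∧ maxB L t ≤ t) := by
  induction t with
  | zero => left; rfl
  | succ t ih =>
    rw [maxB]
    split
    · rename_i h
      right
      exact ⟨h, by omega, le_rfl⟩
    · rcases ih with h | ⟨h1, h2, h3⟩
      · left; exact h
      · right; exact ⟨h1, h2, by omega⟩

theorem maxB_max (L : List Char) (t b : Nat) (hb1 : 1 ≤ b) (hbt : b ≤ t)
    (hz : Zv L (L.length - b) = b) : b ≤ maxB L t := by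
  induction t with
  | zero => omega
  | succ t ih =>
    rw [maxB]
    by_cases hbeq : b = t + 1
    · subst hbeq
      rw [if_pos hz]
    · have := ih (by omega)
      split
      · have := maxB_le L t
        omega
      · omega

-- pySetD at a negative index
theorem pySetD_neg (xs : List Int) (k : Nat) (v : Int) (hk : 0 < k) (hkl : k ≤ xs.length) :
    PySem.List.pySetD xs (-(k : Int)) v = xs.set (xs.length - k) v := by
  rw [PySem.List.pySetD, PySem.List.pySet?, PySem.List.pyIdx?]
  rw [if_neg (by omega), if_pos (by omega)]
  simp only [Option.map_some, Option.getD_some]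
  congr 1
  omega

def Ft (L : List Char) (t : Nat) : List Int :=
  (List.range L.length).map
    (fun p => if L.length - t ≤ p then ((maxB L (L.length - p) : Nat) : Int) else 0)

theorem fst_fold (L : List Char) (t : Nat) (ht : t ≤ L.length) :
    (PySem.List.enumerate
        ((((List.range L.length).map (fun j => ((Zv L j : Nat) : Int))).reverse.take t)) 0).foldl
      fstStep (0, L.map (fun _ => (0 : Int))) = (((maxB L t : Nat) : Int), Ft L t) := by
  induction t with
  | zero =>
    rw [List.take_zero, show PySem.List.enumerate ([] : List Int) 0 = [] from rfl,
      List.foldl_nil, Prod.mk.injEq]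
    refine ⟨by simp [maxB], ?_⟩
    apply List.ext_getElem
    · simp [Ft]
    intro p hp hp2
    have hpn : p < L.length := by simpa using hp
    simp only [Ft, List.getElem_map, List.getElem_range]
    rw [if_neg (by omega)]
  | succ t ih =>
    set Zr := ((List.range L.length).map (fun j => ((Zv L j : Nat) : Int))).reverse with hZr
    have hZrlen : Zr.length = L.length := by simp [hZr]
    have hZrt : Zr[t]? = some ((Zv L (L.length - 1 - t) : Nat) : Int) := by
      rw [hZr, List.getElem?_reverse (by simp; omega)]
      rw [List.getElem?_eq_getElem (by simp; omega)]
      simp only [List.length_map, List.length_range, List.getElem_map, List.getElem_range]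
    rw [List.take_succ, hZrt]
    simp only [Option.toList_some]
    rw [PySem.List.enumerate_append, List.foldl_append, ih (by omega)]
    have hlent : (Zr.take t).length = t := by simp [hZrlen]; omega
    rw [hlent]
    rw [show PySem.List.enumerate [((Zv L (L.length - 1 - t) : Nat) : Int)] (0 + (t : Int)) =
      [((0 + (t : Int)), ((Zv L (L.length - 1 - t) : Nat) : Int))] from rfl]
    rw [List.foldl_cons, List.foldl_nil, fstStep]
    have hidx : L.length - 1 - t = L.length - (t + 1) := by omega
    have hcond : (((Zv L (L.length - 1 - t) : Nat) : Int) = 0 + (t : Int) + 1) ↔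
        (Zv L (L.length - (t+1)) = t + 1) := by
      rw [hidx]
      constructor
      · intro h; omega
      · intro h; rw [h]; push_cast; ring
    have hmaxb : (if ((Zv L (L.length - 1 - t) : Nat) : Int) = 0 + (t : Int) + 1
        then max ((Zv L (L.length - 1 - t) : Nat) : Int) ((maxB L t : Nat) : Int)
        else ((maxB L t : Nat) : Int)) = ((maxB L (t + 1) : Nat) : Int) := by
      by_cases hc : Zv L (L.length - (t+1)) = t + 1
      · rw [if_pos (hcond.mpr hc)]
        have hle := maxB_le L t
        rw [show maxB L (t + 1) = t + 1 by rw [maxB, if_pos hc]]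
        rw [hidx, hc]
        push_cast
        omega
      · rw [if_neg (fun h => hc (hcond.mp h))]
        rw [show maxB L (t + 1) = maxB L t by rw [maxB, if_neg hc]]
    simp only [hmaxb]
    rw [Prod.mk.injEq]
    refine ⟨rfl, ?_⟩
    have hneg : -(0 + (t : Int)) - 1 = -(((t + 1 : Nat) : Int)) := by push_cast; ring
    have hFtlen : (Ft L t).length = L.length := by simp [Ft]
    rw [hneg, pySetD_neg _ (t+1) _ (by omega) (by rw [hFtlen]; omega), hFtlen]
    apply List.ext_getElem
    · simp [Ft]
    intro p hp hp2
    have hpn : p < L.length := by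
      have : ((Ft L t).set (L.length - (t+1)) ((maxB L (t+1) : Nat) : Int)).length = L.length := by
        simp [hFtlen]
      omega
    rw [List.getElem_set]
    simp only [Ft, List.getElem_map, List.getElem_range]
    by_cases hpe : L.length - (t + 1) = p
    · rw [if_pos hpe, if_pos (by omega)]
      rw [show L.length - p = t + 1 by omega]
    · rw [if_neg hpe]
      by_cases hge : L.length - t ≤ p
      · rw [if_pos hge, if_pos (by omega)]
      · rw [if_neg hge, if_neg (by omega)]

theorem fullShiftTable_eq (S : String) :
    fullShiftTable S =
      (List.range S.toList.length).map
        (fun p => ((maxB S.toList (S.toList.length - p) : Nat) : Int)) := by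
  set L := S.toList with hL
  set n := L.length with hn
  rw [fullShiftTable]
  simp only [fp_eq S]
  have htake : (((List.range S.toList.length).map (fun j => ((Zv S.toList j : Nat) : Int))).reverse.take n) =
      ((List.range S.toList.length).map (fun j => ((Zv S.toList j : Nat) : Int))).reverse := by
    apply List.take_of_length_le
    simp [← hL, ← hn]
  rw [← htake]
  rw [fst_fold L n le_rfl]
  rw [Ft]
  apply List.map_congr_left
  intro p hp
  rw [if_pos (by omega)]

-- ===== Section 8: the B-side =====
def bsN (L : List Char) : List Nat :=
  ((List.range L.length).map (· + 1)).filter (fun b => L.take b == L.drop (L.length - b))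

theorem bs_eq (S : String) : bmBorders S = (bsN S.toList).map (fun b : Nat => (b : Int)) := by
  set L := S.toList with hL
  rw [bmBorders, bsN]
  have hlen : PySem.Str.len S = (L.length : Int) := by simp [PySem.Str.len, hL]
  rw [hlen]
  have hrange : PySem.List.pyRange 1 ((L.length : Int) + 1) 1 =
      (List.range L.length).map (fun k : Nat => (1 : Int) + (k : Int)) := by
    rw [PySem.List.pyRange_one]
    have he : (((L.length : Int) + 1 - 1)).toNat = L.length := by omega
    rw [he]
  rw [hrange, List.filter_map, List.filter_map, List.map_map]
  have hfil : ∀ l : List Nat, (∀ k ∈ l, k < L.length) →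
      (List.filter ((fun k : Int => PySem.List.slice L none (some k)
          == PySem.List.slice L (some ((L.length : Int) - k)) none) ∘ (fun k : Nat => (1:Int) + (k:Int))) l) =
      (List.filter ((fun b : Nat => L.take b == L.drop (L.length - b)) ∘ (· + 1)) l) := by
    intro l hl
    apply List.filter_congr
    intro k hk
    have hkn : k < L.length := hl k hk
    simp only [Function.comp_apply]
    have e1 : PySem.List.slice L none (some ((1:Int) + (k:Int))) = L.take (k + 1) := by
      have h := PySem.List.slice_to (xs := L) (b := (1:Int) + (k:Int)) (by omega)
      rw [h, show (((1:Int) + (k:Int))).toNat = k + 1 by omega]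
    have e2 : PySem.List.slice L (some ((L.length : Int) - ((1:Int) + (k:Int)))) none =
        L.drop (L.length - (k + 1)) := by
      have h := PySem.List.slice_from (xs := L) (a := (L.length : Int) - ((1:Int) + (k:Int))) (by omega)
      rw [h, show ((L.length : Int) - ((1:Int) + (k:Int))).toNat = L.length - (k + 1) by omega]
    rw [e1, e2]
  rw [hfil (List.range L.length) (by intro k hk; simpa using hk)]
  apply List.map_congr_left
  intro k hk
  simp only [Function.comp_apply]
  push_cast
  ring

theorem bsN_pairwise (L : List Char) : (bsN L).Pairwise (· < ·) := by
  apply List.Pairwise.filter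
  exact List.Pairwise.map _ (fun a b hab => by omega) List.pairwise_lt_range

theorem bsN_mem (L : List Char) (b : Nat) :
    b ∈ bsN L ↔ (1 ≤ b ∧ b ≤ L.length ∧ L.take b = L.drop (L.length - b)) := by
  rw [bsN, List.mem_filter, List.mem_map]
  constructor
  · rintro ⟨⟨k, hk, rfl⟩, hp⟩
    rw [List.mem_range] at hk
    refine ⟨by omega, by omega, by simpa using hp⟩
  · rintro ⟨h1, h2, h3⟩
    exact ⟨⟨b - 1, by rw [List.mem_range]; omega, by omega⟩, by simpa using h3⟩

-- Zv characterization of borders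
theorem borderZ (L : List Char) (b : Nat) (hb1 : 1 ≤ b) (hbn : b ≤ L.length) :
    (L.take b = L.drop (L.length - b)) ↔ Zv L (L.length - b) = b := by
  constructor
  · intro ht
    apply zv_eq_of
    · intro j hj
      have e1 : (L.take b)[j]? = L[j]? := List.getElem?_take_of_lt (by omega)
      have e2 : (L.drop (L.length - b))[j]? = L[(L.length - b) + j]? := List.getElem?_drop
      refine ⟨by rw [← e1, ht, e2], ?_⟩
      rw [isSome_iff]
      omega
    · intro hcon
      obtain ⟨he, hs⟩ := hcon
      rw [isSome_iff] at hs
      have : L.length - b + b = L.length := by omega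
      rw [this, List.getElem?_eq_none (le_rfl)] at he
      have hsome := (isSome_iff L b).mpr hs
      rw [he] at hsome
      simp at hsome
  · intro hz
    apply List.ext_getElem?
    intro j
    by_cases hj : j < b
    · have e1 : (L.take b)[j]? = L[j]? := List.getElem?_take_of_lt (by omega)
      have e2 : (L.drop (L.length - b))[j]? = L[(L.length - b) + j]? := List.getElem?_drop
      rw [e1, e2]
      exact (zv_agree L (L.length - b) j (by omega)).1
    · rw [List.getElem?_eq_none (by simp; omega), List.getElem?_eq_none (by simp; omega)]

-- count of borders ≤ m
def bC (L : List Char) (m : Int) : Nat := (bsN L).countP (fun b : Nat => decide ((b : Int) ≤ m))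

theorem sorted_countP (l : List Nat) (hl : l.Pairwise (· < ·)) (m : Int) (t : Nat)
    (ht : t < l.length) :
    (((l[t] : Nat) : Int) ≤ m) ↔ t < l.countP (fun b : Nat => decide ((b : Int) ≤ m)) := by
  induction l generalizing t with
  | nil => simp at ht
  | cons x xs ih =>
    rw [List.pairwise_cons] at hl
    rcases t with _ | t
    · simp only [List.getElem_cons_zero]
      constructor
      · intro h
        rw [List.countP_cons]
        simp [h]
      · intro h
        by_contra hq
        rw [List.countP_cons, if_neg (by simpa using hq)] at h
        have : xs.countP (fun b : Nat => decide ((b : Int) ≤ m)) = 0 := by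
          rw [List.countP_eq_zero]
          intro b hb
          have := hl.1 b hb
          simp
          omega
        omega
    · simp only [List.getElem_cons_succ]
      rw [ih hl.2 t (by simpa using ht)]
      rw [List.countP_cons]
      by_cases hx : (x : Int) ≤ m
      · rw [if_pos (by simpa using hx)]
        omega
      · have hxs : xs.countP (fun b : Nat => decide ((b : Int) ≤ m)) = 0 := by
          rw [List.countP_eq_zero]
          intro b hb
          have := hl.1 b hb
          simp
          omega
        rw [if_neg (by simpa using hx)]
        omega

theorem pairwise_getElem_le (l : List Nat) (hl : l.Pairwise (· < ·)) (t u : Nat)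
    (htu : t ≤ u) (hu : u < l.length) : l[t] ≤ l[u] := by
  rcases eq_or_lt_of_le htu with rfl | hlt
  · exact le_rfl
  · have := List.pairwise_iff_getElem.mp hl t u (by omega) hu hlt
    omega

theorem bC_le_len (L : List Char) (m : Int) : bC L m ≤ (bsN L).length := by
  rw [bC]
  exact List.countP_le_length

theorem bC_mono (L : List Char) (m m' : Int) (h : m' ≤ m) : bC L m' ≤ bC L m := by
  apply List.countP_mono_left
  intro b _ hb
  simp at hb ⊢
  omega

theorem bC_full (L : List Char) (m : Int) (hm : (L.length : Int) ≤ m) :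
    bC L m = (bsN L).length := by
  rw [bC, List.countP_eq_length]
  intro b hb
  rw [bsN_mem] at hb
  simp
  omega

-- the inner while loop
theorem bmScan_eq (L : List Char) (m : Int) (j : Int)
    (hj1 : (bC L m : Int) - 1 ≤ j) (hj2 : j < ((bsN L).length : Int)) :
    bmScan ((bsN L).map (fun b : Nat => (b : Int))) j m = (bC L m : Int) - 1 := by
  rw [bmScan]
  rcases lt_or_ge j 0 with hneg | hpos
  · rw [dif_neg (by omega)]
    have : bC L m = 0 := by omega
    omega
  · have hjt : j.toNat < (bsN L).length := by omega
    have hget : PySem.List.pyGetD ((bsN L).map (fun b : Nat => (b : Int))) j 0 = (((bsN L)[j.toNat] : Nat) : Int) := by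
      rw [PySem.List.pyGetD, PySem.List.pyGet?_of_nonneg _ hpos]
      rw [List.getElem?_map, List.getElem?_eq_getElem hjt]
      rfl
    by_cases hcond : m < PySem.List.pyGetD ((bsN L).map (fun b : Nat => (b : Int))) j 0
    · rw [dif_pos ⟨hpos, hcond⟩]
      have hnotle : ¬ ((((bsN L)[j.toNat] : Nat) : Int) ≤ m) := by
        rw [← hget]
        omega
      have hfold : (bsN L).countP (fun b : Nat => decide ((b : Int) ≤ m)) = bC L m := rfl
      have := (sorted_countP (bsN L) (bsN_pairwise L) m j.toNat hjt).not
      rw [hfold] at this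
      have hCle : ¬ (j.toNat < bC L m) := this.mp hnotle
      exact bmScan_eq L m (j - 1) (by omega) (by omega)
    · rw [dif_neg (by intro hc; exact hcond hc.2)]
      have hle : (((bsN L)[j.toNat] : Nat) : Int) ≤ m := by
        rw [← hget]
        omega
      have hfold : (bsN L).countP (fun b : Nat => decide ((b : Int) ≤ m)) = bC L m := rfl
      have := (sorted_countP (bsN L) (bsN_pairwise L) m j.toNat hjt).mp hle
      rw [hfold] at this
      omega
termination_by (j + 1).toNat
decreasing_by omega

-- the value appended at bound m
theorem value_eq (L : List Char) (m : Nat) (hm1 : 1 ≤ m) (hmn : m ≤ L.length) :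
    (if (0 : Int) ≤ (bC L (m : Int) : Int) - 1
      then PySem.List.pyGetD ((bsN L).map (fun b : Nat => (b : Int))) ((bC L (m : Int) : Int) - 1) 0
      else 0) = ((maxB L m : Nat) : Int) := by
  set C := bC L (m : Int) with hC
  rcases Nat.eq_zero_or_pos C with hC0 | hCpos
  · rw [if_neg (by omega)]
    rcases maxB_isB L m with h0 | ⟨hz, h1, h2⟩
    · rw [h0]; rfl
    · exfalso
      have hmem : maxB L m ∈ bsN L := by
        rw [bsN_mem]
        refine ⟨h1, by omega, ?_⟩
        rw [borderZ L (maxB L m) h1 (by omega)]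
        exact hz
      have : 0 < C := by
        rw [hC, bC, List.countP_pos_iff]
        exact ⟨maxB L m, hmem, by simp; omega⟩
      omega
  · rw [if_pos (by omega)]
    have htC : C - 1 < (bsN L).length := by
      have := bC_le_len L (m : Int)
      omega
    have hget : PySem.List.pyGetD ((bsN L).map (fun b : Nat => (b : Int))) ((C : Int) - 1) 0 =
        (((bsN L)[C - 1] : Nat) : Int) := by
      rw [PySem.List.pyGetD, PySem.List.pyGet?_of_nonneg _ (by omega)]
      rw [show ((C : Int) - 1).toNat = C - 1 by omega]
      rw [List.getElem?_map, List.getElem?_eq_getElem htC]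
      rfl
    rw [hget]
    set v := (bsN L)[C - 1] with hv
    have hvle : (v : Int) ≤ (m : Int) := by
      have hfold : (bsN L).countP (fun b : Nat => decide ((b : Int) ≤ (m : Int))) = bC L (m : Int) := rfl
      rw [sorted_countP (bsN L) (bsN_pairwise L) (m : Int) (C - 1) htC, hfold, ← hC]
      omega
    have hvmem : v ∈ bsN L := List.getElem_mem htC
    have hvb := (bsN_mem L v).mp hvmem
    have hv_le_max : v ≤ maxB L m := by
      apply maxB_max L m v hvb.1 (by omega)
      rw [← borderZ L v hvb.1 hvb.2.1]
      exact hvb.2.2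
    have hmax_le_v : maxB L m ≤ v := by
      rcases maxB_isB L m with h0 | ⟨hz, h1, h2⟩
      · omega
      · have hmem : maxB L m ∈ bsN L := by
          rw [bsN_mem]
          refine ⟨h1, by omega, ?_⟩
          rw [borderZ L (maxB L m) h1 (by omega)]
          exact hz
        obtain ⟨u, hu, huv⟩ := List.mem_iff_getElem.mp hmem
        have huC : u < C := by
          have hfold : (bsN L).countP (fun b : Nat => decide ((b : Int) ≤ (m : Int))) = bC L (m : Int) := rfl
          rw [hC, ← hfold, ← sorted_countP (bsN L) (bsN_pairwise L) (m : Int) u hu, huv]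
          exact_mod_cast h2
        rw [← huv]
        exact pairwise_getElem_le (bsN L) (bsN_pairwise L) u (C - 1) (by omega) htC
    have : v = maxB L m := by omega
    exact_mod_cast this

-- the main loop of B
theorem alt_fold (S : String) (i : Nat) (hi : i ≤ S.toList.length) :
    ((PySem.List.pyRange 0 (i : Int) 1).foldl
      (fun (st : List Int × Int) q =>
        let j := bmScan (bmBorders S) st.2 (((S.toList.length : Nat) : Int) - q)
        (st.1 ++ [if 0 ≤ j then PySem.List.pyGetD (bmBorders S) j 0 else 0], j))
      ([], PySem.List.len (bmBorders S) - 1))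
    = ((List.range i).map (fun p => ((maxB S.toList (S.toList.length - p) : Nat) : Int)),
       (bC S.toList (((S.toList.length : Nat) : Int) - (i : Int) + 1) : Int) - 1) := by
  induction i with
  | zero =>
    rw [show ((0 : Nat) : Int) = 0 from rfl, PySem.List.pyRange_one_eq_nil le_rfl, List.foldl_nil]
    rw [Prod.mk.injEq]
    constructor
    · simp
    · rw [bs_eq, PySem.List.len_eq]
      rw [bC_full S.toList _ (by omega)]
      simp
  | succ i ih =>
    have hcast : ((i + 1 : Nat) : Int) = (i : Nat) + 1 := by push_cast; ring
    rw [hcast, PySem.List.pyRange_one_succ_right (by omega), List.foldl_append,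
      ih (by omega), List.foldl_cons, List.foldl_nil]
    simp only []
    have hscan : bmScan (bmBorders S) ((bC S.toList (((S.toList.length : Nat) : Int) - (i : Int) + 1) : Int) - 1)
        (((S.toList.length : Nat) : Int) - (i : Int)) = (bC S.toList (((S.toList.length : Nat) : Int) - (i : Int)) : Int) - 1 := by
      rw [bs_eq]
      apply bmScan_eq
      · have := bC_mono S.toList (((S.toList.length : Nat) : Int) - (i : Int) + 1) (((S.toList.length : Nat) : Int) - (i : Int)) (by omega)
        omega
      · have := bC_le_len S.toList (((S.toList.length : Nat) : Int) - (i : Int) + 1)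
        omega
    rw [hscan]
    have hm : ((S.toList.length - i : Nat) : Int) = ((S.toList.length : Nat) : Int) - (i : Nat) := by
      have : i < S.toList.length := by omega
      omega
    have hval := value_eq S.toList (S.toList.length - i) (by omega) (by omega)
    rw [hm] at hval
    rw [bs_eq]
    rw [Prod.mk.injEq]
    constructor
    · rw [hval, List.range_succ, List.map_append]
      rfl
    · have : ((S.toList.length : Nat) : Int) - ((i : Nat) + 1) + 1 = ((S.toList.length : Nat) : Int) - (i : Nat) := by ring
      rw [this]
theorem fullShiftTable_alt_eq (S : String) :
    fullShiftTable_alt S =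
      (List.range S.toList.length).map
        (fun p => ((maxB S.toList (S.toList.length - p) : Nat) : Int)) := by
  have hlen : PySem.Str.len S = ((S.toList.length : Nat) : Int) := by simp [PySem.Str.len]
  simp only [fullShiftTable_alt, hlen]
  rw [alt_fold S S.toList.length le_rfl]


-- ===== VERDICT (by name: the statement is the Claim_ definition above) =====
theorem fullShiftTable_spec : Claim_equal_fullShiftTable := by
  intro S _
  unfold Spec_fullShiftTable
  rw [fullShiftTable_eq, fullShiftTable_alt_eq]
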